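-- pv_equiv track=rewrite | github.com/J-dbd/00.bj_SolveRecord | programmers/lv1/정렬.k번째수/answer.py | solution
-- ===== SOURCE A (Python) =====
-- def solution(array, commands):
--     answer = []
--
--     for command in commands:
--         start, end, targetIndex = command
--         tempArr = array[start-1: end]
--         tempArr.sort()
--         answer.append(tempArr[targetIndex-1])
--     return answer
-- ===== SOURCE B (Python) =====
-- def _kth_smallest(xs, k):
--     # quickselect: k-th smallest (1-indexed) of xs, assuming 1 <= k <= len(xs)
--     pivot = xs[len(xs) // 2]
--     lt = [x for x in xs if x < pivot]
--     eq = [x for x in xs if x == pivot]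
--     gt = [x for x in xs if x > pivot]
--     if k <= len(lt):
--         return _kth_smallest(lt, k)
--     if k <= len(lt) + len(eq):
--         return pivot
--     return _kth_smallest(gt, k - len(lt) - len(eq))
--
-- def solution(array, commands):
--     return [_kth_smallest(array[s - 1:e], k) for s, e, k in commands]
-- ===== Notes on version B (the rewrite author's own statement) =====
-- stated objective: alternative
-- what changed: Replaces per-query full sort plus indexing by a recursive three-way-partition quickselect of the k-th smallest element, collected with a list comprehension instead of an append loop.
-- outside the precondition, e.g. on solution([3, 1, 2], [[1, 3, 0]]): A returns [3], B raises IndexError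
import Mathlib
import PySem

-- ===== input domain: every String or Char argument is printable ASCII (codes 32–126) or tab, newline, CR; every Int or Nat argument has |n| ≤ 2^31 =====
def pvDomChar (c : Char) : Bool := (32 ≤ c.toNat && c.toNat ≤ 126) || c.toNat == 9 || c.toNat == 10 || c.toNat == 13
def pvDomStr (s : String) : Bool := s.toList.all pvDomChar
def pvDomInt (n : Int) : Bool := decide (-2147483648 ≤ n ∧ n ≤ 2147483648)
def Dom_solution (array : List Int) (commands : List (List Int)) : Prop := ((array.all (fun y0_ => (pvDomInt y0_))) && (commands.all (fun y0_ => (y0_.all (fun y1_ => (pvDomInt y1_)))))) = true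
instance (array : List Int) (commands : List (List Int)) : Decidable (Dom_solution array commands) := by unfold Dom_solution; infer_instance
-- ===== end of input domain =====

-- B answers each query with a recursive three-way-partition quickselect instead of sorting the whole
-- slice and indexing; same return values on Pre_ (A only copies the slice, neither mutates an argument).

-- ===== PORT A =====
-- literal port of A: for each command, unpack [start, end, targetIndex], sort the slice, append slice[targetIndex-1]
def solution (array : List Int) (commands : List (List Int)) : List Int :=
  commands.foldl (fun answer command =>
    match command with
    | [start, end_, targetIndex] =>
        let tempArr := PySem.List.sorted (PySem.List.slice array (some (start - 1)) (some end_)) (fun x => x) false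
        answer ++ [(PySem.List.pyGet? tempArr (targetIndex - 1)).getD 0]
    | _ => answer) []   -- Python raises here (unpacking a non-triple); excluded by Pre_

-- ===== PORT B =====
-- quickselect from Source B: partition around the middle element, recurse into the side holding rank k
def kthSmallest (xs : List Int) (k : Int) : Int :=
  match hxs : xs with
  | [] => 0   -- Python raises IndexError here; excluded by Pre_
  | _ :: _ =>
    let pivot := xs.getD (xs.length / 2) 0
    let lt := xs.filter (fun x => decide (x < pivot))
    let eqs := xs.filter (fun x => decide (x = pivot))
    let gt := xs.filter (fun x => decide (pivot < x))
    if k ≤ lt.length then kthSmallest lt k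
    else if k ≤ lt.length + eqs.length then pivot
    else kthSmallest gt (k - lt.length - eqs.length)
termination_by xs.length
decreasing_by
  all_goals
    simp only [List.unattach, List.length_map, ← hxs, ← List.length_attach (l := xs)]
    have hl : xs.length / 2 < xs.length := by subst hxs; simp only [List.length_cons]; omega
    have hp : xs.getD (xs.length / 2) 0 ∈ xs := by
      rw [List.getD_eq_getElem _ _ hl]; exact List.getElem_mem hl
    exact List.length_filter_lt_length_iff_exists.mpr ⟨⟨_, hp⟩, List.mem_attach _ _, by simp⟩

def solution_alt (array : List Int) (commands : List (List Int)) : List Int :=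
  -- the triple unpacking 's, e, k = c' written with positional reads (Python raises on a
  -- non-triple; those commands are excluded by Pre_)
  commands.map (fun c =>
    kthSmallest (PySem.List.slice array (some (c.getD 0 0 - 1)) (some (c.getD 1 0))) (c.getD 2 0))

-- ===== PRECONDITION & SPEC =====
-- Pre_ excludes commands that are not triples or whose targetIndex is not a valid 1-based rank in the
-- slice: there A raises (unpacking / IndexError) or returns a value only by negative-index wraparound,
-- and B's quickselect itself raises (IndexError on an exhausted partition).
def Pre_solution (array : List Int) (commands : List (List Int)) : Prop :=
  ∀ c ∈ commands, c.length = 3 ∧ 1 ≤ c.getD 2 0 ∧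
    c.getD 2 0 ≤ ((PySem.List.slice array (some (c.getD 0 0 - 1)) (some (c.getD 1 0))).length : Int)
instance (array : List Int) (commands : List (List Int)) : Decidable (Pre_solution array commands) := by
  unfold Pre_solution; infer_instance

def pvWitness_solution : List Int × List (List Int) :=
  ([1, 5, 2, 6, 3, 7, 4], [[2, 5, 3], [4, 4, 1], [1, 7, 3]])

def Spec_solution (array : List Int) (commands : List (List Int)) (out : List Int) : Prop := out = solution_alt array commands
instance (array : List Int) (commands : List (List Int)) (out : List Int) : Decidable (Spec_solution array commands out) := by unfold Spec_solution; infer_instance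

-- ===== CLAIM (what is proved, stated in full; the proofs are below) =====
def Claim_equal_solution : Prop := ∀ (array : List Int) (commands : List (List Int)), Dom_solution array commands → Pre_solution array commands → Spec_solution array commands (solution array commands)

-- ===== LEMMAS AND PROOFS =====

-- sorted(xs) splits around any pivot into sorted(<) ++ the equals ++ sorted(>)
theorem sorted_three_way (xs : List Int) (pivot : Int) :
    PySem.List.sorted xs (fun x => x) false =
      PySem.List.sorted (xs.filter (fun x => decide (x < pivot))) (fun x => x) false
        ++ xs.filter (fun x => decide (x = pivot))
        ++ PySem.List.sorted (xs.filter (fun x => decide (pivot < x))) (fun x => x) := by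
  set p : Int → Bool := fun x => decide (x < pivot) with hp
  set q : Int → Bool := fun x => decide (x = pivot) with hq
  set g : Int → Bool := fun x => decide (pivot < x) with hg
  apply PySem.List.sorted_id_eq_of_perm_of_pairwise
  · have heq : (xs.filter (fun x => !p x)).filter q = xs.filter q := by
      rw [List.filter_filter]
      exact List.filter_congr (fun x _ => by by_cases h : x = pivot <;> simp [hp, hq, h])
    have hgt : (xs.filter (fun x => !p x)).filter (fun x => !q x) = xs.filter g := by
      rw [List.filter_filter]
      exact List.filter_congr (fun x _ => by
        by_cases h1 : x < pivot <;> by_cases h2 : x = pivot <;>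
          simp [hp, hq, hg, h1, h2] <;> omega)
    have hge : (xs.filter q ++ xs.filter g).Perm (xs.filter (fun x => !p x)) := by
      rw [← heq, ← hgt]; exact List.filter_append_perm q _
    have h1 : ((PySem.List.sorted (xs.filter p) (fun x => x) false) ++
        (xs.filter q ++ PySem.List.sorted (xs.filter g) (fun x => x) false)).Perm
        (xs.filter p ++ (xs.filter q ++ xs.filter g)) :=
      (PySem.List.sorted_perm _ _ _).append ((List.Perm.refl _).append (PySem.List.sorted_perm _ _ _))
    rw [List.append_assoc]
    exact h1.trans (((List.Perm.refl (xs.filter p)).append hge).trans (List.filter_append_perm p xs))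
  · have hmlt : ∀ a ∈ PySem.List.sorted (xs.filter p) (fun x => x) false, a < pivot := by
      intro a ha
      have := (PySem.List.mem_sorted _ _ _ _).mp ha
      simp [hp] at this; exact this.2
    have hmeq : ∀ a ∈ xs.filter q, a = pivot := by
      intro a ha; simp [hq] at ha; exact ha.2
    have hmgt : ∀ a ∈ PySem.List.sorted (xs.filter g) (fun x => x) false, pivot < a := by
      intro a ha
      have := (PySem.List.mem_sorted _ _ _ _).mp ha
      simp [hg] at this; exact this.2
    rw [List.append_assoc, List.pairwise_append]
    refine ⟨by simpa using PySem.List.sorted_pairwise (xs.filter p) (fun x => x), ?_, ?_⟩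
    · rw [List.pairwise_append]
      refine ⟨List.pairwise_of_forall_mem_list (fun a ha b hb => by rw [hmeq a ha, hmeq b hb]),
        by simpa using PySem.List.sorted_pairwise (xs.filter g) (fun x => x), ?_⟩
      intro a ha b hb
      exact le_of_lt ((hmeq a ha) ▸ hmgt b hb)
    · intro a ha b hb
      rcases List.mem_append.mp hb with hb | hb
      · rw [hmeq b hb]; exact le_of_lt (hmlt a ha)
      · exact le_of_lt (lt_trans (hmlt a ha) (hmgt b hb))

-- the three partitions together have the length of xs
theorem three_way_length (xs : List Int) (pivot : Int) :
    (xs.filter (fun x => decide (x < pivot))).length + ((xs.filter (fun x => decide (x = pivot))).length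
      + (xs.filter (fun x => decide (pivot < x))).length) = xs.length := by
  have h := congrArg List.length (sorted_three_way xs pivot)
  simpa [PySem.List.length_sorted, Nat.add_assoc] using h.symm

-- quickselect returns the (k-1)-th element of the sorted list (strong induction on the length bound)
theorem kthSmallest_bound_aux (n : Nat) :
    ∀ (xs : List Int), xs.length ≤ n → ∀ (k : Int), 1 ≤ k → k ≤ (xs.length : Int) →
      kthSmallest xs k = (PySem.List.sorted xs (fun x => x) false).getD (k - 1).toNat 0 := by
  induction n with
  | zero =>
    intro xs hn k h1 h2
    omega
  | succ n ih =>
    intro xs hn k h1 h2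
    match xs with
    | [] => simp at h2; omega
    | hd :: tl =>
      rw [kthSmallest.eq_def]
      simp only []
      set pivot := (hd :: tl).getD ((hd :: tl).length / 2) 0 with hpiv
      set lt := (hd :: tl).filter (fun x => decide (x < pivot)) with hlt
      set eqs := (hd :: tl).filter (fun x => decide (x = pivot)) with heqs
      set gt := (hd :: tl).filter (fun x => decide (pivot < x)) with hgt
      have hmem : pivot ∈ hd :: tl := by
        have hl : (hd :: tl).length / 2 < (hd :: tl).length := by simp only [List.length_cons]; omega
        rw [hpiv, List.getD_eq_getElem _ _ hl]; exact List.getElem_mem hl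
      have hltlen : lt.length < (hd :: tl).length := by
        rw [hlt]; exact List.length_filter_lt_length_iff_exists.mpr ⟨pivot, hmem, by simp⟩
      have hgtlen : gt.length < (hd :: tl).length := by
        rw [hgt]; exact List.length_filter_lt_length_iff_exists.mpr ⟨pivot, hmem, by simp⟩
      have hsum := three_way_length (hd :: tl) pivot
      rw [← hlt, ← heqs, ← hgt] at hsum
      split_ifs with hk1 hk2
      · rw [sorted_three_way (hd :: tl) pivot, ← hlt, ← heqs, ← hgt, List.append_assoc,
          List.getD_append _ _ _ _ (by rw [PySem.List.length_sorted]; omega)]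
        exact ih lt (by omega) k h1 hk1
      · rw [sorted_three_way (hd :: tl) pivot, ← hlt, ← heqs, ← hgt, List.append_assoc,
          List.getD_append_right _ _ _ _ (by rw [PySem.List.length_sorted]; omega),
          List.getD_append _ _ _ _ (by rw [PySem.List.length_sorted]; omega)]
        have hj : (k - 1).toNat - (PySem.List.sorted lt (fun x => x) false).length < eqs.length := by
          rw [PySem.List.length_sorted]; omega
        rw [List.getD_eq_getElem _ _ hj]
        have hm : eqs[(k - 1).toNat - (PySem.List.sorted lt (fun x => x) false).length] ∈ eqs :=
          List.getElem_mem hj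
        have := (List.mem_filter.mp hm).2
        simp only [decide_eq_true_eq] at this
        exact this.symm
      · rw [sorted_three_way (hd :: tl) pivot, ← hlt, ← heqs, ← hgt, List.append_assoc,
          List.getD_append_right _ _ _ _ (by rw [PySem.List.length_sorted]; omega),
          List.getD_append_right _ _ _ _ (by rw [PySem.List.length_sorted]; omega)]
        have hrec := ih gt (by omega) (k - lt.length - eqs.length) (by omega) (by omega)
        rw [hrec]
        congr 1
        rw [PySem.List.length_sorted]
        omega

theorem kthSmallest_eq_sorted_getD (xs : List Int) (k : Int)
    (h1 : 1 ≤ k) (h2 : k ≤ (xs.length : Int)) :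
    kthSmallest xs k = (PySem.List.sorted xs (fun x => x) false).getD (k - 1).toNat 0 :=
  kthSmallest_bound_aux xs.length xs le_rfl k h1 h2

-- A's fold over the commands, with any accumulator, is the accumulator followed by B's map
theorem solution_foldl_aux (array : List Int) (cmds : List (List Int)) :
    ∀ acc : List Int, Pre_solution array cmds →
      cmds.foldl (fun answer command =>
        match command with
        | [start, end_, targetIndex] =>
            let tempArr := PySem.List.sorted (PySem.List.slice array (some (start - 1)) (some end_)) (fun x => x) false
            answer ++ [(PySem.List.pyGet? tempArr (targetIndex - 1)).getD 0]
        | _ => answer) acc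
      = acc ++ cmds.map (fun c =>
        kthSmallest (PySem.List.slice array (some (c.getD 0 0 - 1)) (some (c.getD 1 0))) (c.getD 2 0)) := by
  induction cmds with
  | nil => intro acc _; simp
  | cons c cs ihc =>
    intro acc hpre
    have hc := hpre c List.mem_cons_self
    have hcs : Pre_solution array cs := fun d hd => hpre d (List.mem_cons_of_mem _ hd)
    rcases c with _ | ⟨s, _ | ⟨e, _ | ⟨k, _ | ⟨x, rest⟩⟩⟩⟩ <;> simp only [List.length_nil,
      List.length_cons, List.getD] at hc <;> try omega
    obtain ⟨-, hk1, hk2⟩ := hc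
    simp only [List.getElem?_cons_succ, List.getElem?_cons_zero, Option.getD_some] at hk1 hk2
    simp only [List.foldl_cons, List.map_cons, List.getD_cons_zero, List.getD_cons_succ]
    rw [ihc _ hcs]
    have helem :
        (PySem.List.pyGet? (PySem.List.sorted (PySem.List.slice array (some (s - 1)) (some e)) (fun x => x) false) (k - 1)).getD 0
          = kthSmallest (PySem.List.slice array (some (s - 1)) (some e)) k := by
      set sl := PySem.List.slice array (some (s - 1)) (some e) with hsl
      have hlen : (PySem.List.sorted sl (fun x => x) false).length = sl.length :=
        PySem.List.length_sorted _ _ _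
      rw [PySem.List.pyGet?_eq_some_getElem _ (by omega) (by rw [hlen]; omega)]
      rw [kthSmallest_eq_sorted_getD sl k hk1 hk2]
      rw [List.getD_eq_getElem _ _ (by rw [hlen]; omega)]
      rfl
    rw [helem, List.append_assoc]
    rfl

-- ===== VERDICT (by name: the statement is the Claim_ definition above) =====
theorem solution_spec : Claim_equal_solution := by
  intro array commands _ hpre
  unfold Spec_solution solution solution_alt
  simpa using solution_foldl_aux array commands [] hpre
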